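-- pv_equiv track=rewrite | github.com/leeminhee119/AlgorithmStudy | binary_search/ex03.py | getH
-- ===== SOURCE A (Python) =====
-- def getH(lengths, h_start, h_end, target):
--     # if h_start > h_end:
--     #     return current_mid
--     mid = (h_start + h_end) // 2 # 높이 h는 양의 정수
--     result = 0
--     for i in range(len(lengths)):
--         if lengths[i] <= mid:
--             continue
--         result += lengths[i] - mid
--     if result < target and h_start <= mid-1:
--         return getH(lengths, h_start, mid-1, target)
--     elif result > target and mid+1 <= h_end:
--         return getH(lengths, mid+1, h_end, target)
--     else:
--         return mid
-- ===== SOURCE B (Python) =====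
-- def getH(lengths, h_start, h_end, target):
--     s = sorted(lengths)
--     n = len(s)
--     suffix = [0]
--     for v in reversed(s):
--         suffix.append(v + suffix[-1])
--     suffix.reverse()
--     lo, hi = h_start, h_end
--     while True:
--         mid = (lo + hi) // 2
--         a, b = 0, n
--         while a < b:
--             m = (a + b) // 2
--             if s[m] <= mid:
--                 a = m + 1
--             else:
--                 b = m
--         result = suffix[a] - (n - a) * mid
--         if result < target and lo <= mid - 1:
--             hi = mid - 1
--         elif result > target and mid + 1 <= hi:
--             lo = mid + 1
--         else:
--             return mid
-- ===== Notes on version B (the rewrite author's own statement) =====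
-- stated objective: alternative
-- what changed: B sorts the lengths once and builds suffix sums, then runs the height binary search iteratively, evaluating each midpoint's cut total by an inner binary search on the sorted list plus one suffix-sum lookup instead of A's full O(n) scan per recursive call.
import Mathlib
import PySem

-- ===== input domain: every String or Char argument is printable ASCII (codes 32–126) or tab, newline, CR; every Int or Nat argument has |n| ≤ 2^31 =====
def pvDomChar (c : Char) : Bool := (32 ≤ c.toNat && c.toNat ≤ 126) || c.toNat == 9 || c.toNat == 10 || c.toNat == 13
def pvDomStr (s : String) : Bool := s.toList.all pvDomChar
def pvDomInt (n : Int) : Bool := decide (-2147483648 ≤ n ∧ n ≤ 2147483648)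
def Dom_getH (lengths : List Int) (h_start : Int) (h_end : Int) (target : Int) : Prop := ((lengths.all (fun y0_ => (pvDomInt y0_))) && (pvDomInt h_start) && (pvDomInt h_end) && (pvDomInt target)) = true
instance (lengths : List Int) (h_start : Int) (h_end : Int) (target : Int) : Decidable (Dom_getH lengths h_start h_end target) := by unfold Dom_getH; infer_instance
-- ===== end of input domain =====

-- B replaces A's per-midpoint O(n) scan by sort + suffix sums + an inner binary search (alternative algorithm, similar measured cost).

-- ===== PORT A =====
-- literal transliteration of A: recursive binary search, cut total recomputed by a full scan each call
def getH (lengths : List Int) (h_start : Int) (h_end : Int) (target : Int) : Int :=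
  let mid := PySem.Int.floordiv (h_start + h_end) 2
  let result := (PySem.List.pyRange 0 lengths.length 1).foldl
      (fun r i =>
        if PySem.List.pyGetD lengths i 0 ≤ mid then r
        else r + (PySem.List.pyGetD lengths i 0 - mid)) 0
  if result < target ∧ h_start ≤ mid - 1 then getH lengths h_start (mid - 1) target
  else if result > target ∧ mid + 1 ≤ h_end then getH lengths (mid + 1) h_end target
  else mid
termination_by (h_end - h_start + 1).toNat
decreasing_by
  · have h2 := (PySem.Int.floordiv_eq_iff_of_pos (a := h_start + h_end) (b := 2)
      (q := PySem.Int.floordiv (h_start + h_end) 2) (by norm_num)).mp rfl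
    omega
  · have h2 := (PySem.Int.floordiv_eq_iff_of_pos (a := h_start + h_end) (b := 2)
      (q := PySem.Int.floordiv (h_start + h_end) 2) (by norm_num)).mp rfl
    omega

-- ===== PORT B =====
-- inner binary search of Source B: first index j in [a,b) of sorted s with s[j] > mid (a if none)
def bisGt (s : List Int) (mid : Int) (a : Int) (b : Int) : Int :=
  if a < b then
    let m := PySem.Int.floordiv (a + b) 2
    if PySem.List.pyGetD s m 0 ≤ mid then bisGt s mid (m + 1) b
    else bisGt s mid a m
  else a
termination_by (b - a).toNat
decreasing_by
  · have h2 := (PySem.Int.floordiv_eq_iff_of_pos (a := a + b) (b := 2)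
      (q := PySem.Int.floordiv (a + b) 2) (by norm_num)).mp rfl
    omega
  · have h2 := (PySem.Int.floordiv_eq_iff_of_pos (a := a + b) (b := 2)
      (q := PySem.Int.floordiv (a + b) 2) (by norm_num)).mp rfl
    omega

-- Source B's `while True` loop over (lo, hi)
def loopB (s : List Int) (suffix : List Int) (n : Int) (lo : Int) (hi : Int) (target : Int) : Int :=
  let mid := PySem.Int.floordiv (lo + hi) 2
  let a := bisGt s mid 0 n
  let result := PySem.List.pyGetD suffix a 0 - (n - a) * mid
  if result < target ∧ lo ≤ mid - 1 then loopB s suffix n lo (mid - 1) target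
  else if result > target ∧ mid + 1 ≤ hi then loopB s suffix n (mid + 1) hi target
  else mid
termination_by (hi - lo + 1).toNat
decreasing_by
  · have h2 := (PySem.Int.floordiv_eq_iff_of_pos (a := lo + hi) (b := 2)
      (q := PySem.Int.floordiv (lo + hi) 2) (by norm_num)).mp rfl
    omega
  · have h2 := (PySem.Int.floordiv_eq_iff_of_pos (a := lo + hi) (b := 2)
      (q := PySem.Int.floordiv (lo + hi) 2) (by norm_num)).mp rfl
    omega

-- literal transliteration of Source B: sort, suffix sums (append then reverse), iterative search
def getH_alt (lengths : List Int) (h_start : Int) (h_end : Int) (target : Int) : Int :=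
  let s := PySem.List.sorted lengths id false
  let n : Int := s.length
  let t := s.reverse.foldl (fun acc v => acc ++ [v + PySem.List.pyGetD acc (-1) 0]) [0]
  let suffix := t.reverse
  loopB s suffix n h_start h_end target

-- ===== PRECONDITION & SPEC =====
def Spec_getH (lengths : List Int) (h_start : Int) (h_end : Int) (target : Int) (out : Int) : Prop := out = getH_alt lengths h_start h_end target
instance (lengths : List Int) (h_start : Int) (h_end : Int) (target : Int) (out : Int) : Decidable (Spec_getH lengths h_start h_end target out) := by unfold Spec_getH; infer_instance

-- ===== CLAIM (what is proved, stated in full; the proofs are below) =====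
def Claim_equal_getH : Prop := ∀ (lengths : List Int) (h_start : Int) (h_end : Int) (target : Int), Dom_getH lengths h_start h_end target → Spec_getH lengths h_start h_end target (getH lengths h_start h_end target)

-- ===== LEMMAS AND PROOFS =====

-- cut total as a mapped sum (proof-side helper)
def cutOf (xs : List Int) (mid : Int) : Int :=
  (xs.map (fun v => if v ≤ mid then 0 else v - mid)).sum

theorem foldl_cut (xs : List Int) (mid : Int) : ∀ init : Int,
    xs.foldl (fun r v => if v ≤ mid then r else r + (v - mid)) init = init + cutOf xs mid := by
  induction xs with
  | nil => intro init; simp [cutOf]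
  | cons x xs ih =>
    intro init
    simp only [List.foldl_cons, cutOf, List.map_cons, List.sum_cons]
    rw [ih]
    split
    · simp [cutOf]
    · simp [cutOf]; ring

theorem scanA_eq (lengths : List Int) (mid : Int) :
    (PySem.List.pyRange 0 lengths.length 1).foldl
      (fun r i =>
        if PySem.List.pyGetD lengths i 0 ≤ mid then r
        else r + (PySem.List.pyGetD lengths i 0 - mid)) 0 = cutOf lengths mid := by
  rw [PySem.List.foldl_pyRange_zero_pyGetD' lengths 0
      (fun r v => if v ≤ mid then r else r + (v - mid)) 0]
  rw [foldl_cut]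
  simp

theorem cutOf_perm {xs ys : List Int} (h : xs.Perm ys) (mid : Int) :
    cutOf xs mid = cutOf ys mid := by
  unfold cutOf
  exact (h.map _).sum_eq

theorem sum_map_sub (l : List Int) (c : Int) :
    (l.map (fun v => v - c)).sum = l.sum - l.length * c := by
  induction l with
  | nil => simp
  | cons x xs ih => simp [ih]; ring

-- the prefix-sum accumulator of Source B, characterized
theorem G_eq (l : List Int) :
    l.foldl (fun acc v => acc ++ [v + PySem.List.pyGetD acc (-1) 0]) [0]
      = (List.range (l.length + 1)).map (fun k => ((l.take k).sum : Int)) := by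
  induction l using List.reverseRecOn with
  | nil => simp
  | append_singleton l x ih =>
    rw [List.foldl_append, List.foldl_cons, List.foldl_nil, ih]
    have hlast : PySem.List.pyGetD ((List.range (l.length + 1)).map (fun k => ((l.take k).sum : Int))) (-1) 0 = l.sum := by
      rw [List.range_succ, List.map_append, List.map_singleton]
      rw [PySem.List.pyGetD_neg_one_append_singleton]
      simp
    rw [hlast]
    rw [show (l ++ [x]).length + 1 = (l.length + 1) + 1 by simp]
    rw [List.range_succ (n := l.length + 1), List.map_append, List.map_singleton]
    congr 1
    · apply List.map_congr_left
      intro k hk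
      rw [List.mem_range] at hk
      rw [List.take_append_of_le_length (by omega)]
    · rw [List.take_of_length_le (by simp)]
      simp [add_comm]


theorem suffix_get (s : List Int) (j : Int) (h0 : 0 ≤ j) (h1 : j ≤ (s.length : Int)) :
    PySem.List.pyGetD
      ((s.reverse.foldl (fun acc v => acc ++ [v + PySem.List.pyGetD acc (-1) 0]) [0]).reverse) j 0
      = (s.drop j.toNat).sum := by
  rw [G_eq]
  rw [PySem.List.pyGetD_eq_getElem _ 0 h0 (by simp; omega)]
  rw [List.getElem_reverse, List.getElem_map, List.getElem_range]
  rw [← List.sum_reverse (s.drop j.toNat), List.reverse_drop]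
  congr 1
  simp

theorem bisGt_spec (s : List Int) (hs : s.Pairwise (· ≤ ·)) (mid : Int) :
    ∀ (k : Nat) (a b : Int), (b - a).toNat = k → 0 ≤ a → a ≤ b → b ≤ (s.length : Int) →
    (∀ (i : Nat) (hi : i < s.length), (i : Int) < a → s[i] ≤ mid) →
    (∀ (i : Nat) (hi : i < s.length), b ≤ (i : Int) → mid < s[i]) →
    a ≤ bisGt s mid a b ∧ bisGt s mid a b ≤ b ∧
    (∀ (i : Nat) (hi : i < s.length), (i : Int) < bisGt s mid a b → s[i] ≤ mid) ∧
    (∀ (i : Nat) (hi : i < s.length), bisGt s mid a b ≤ (i : Int) → mid < s[i]) := by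
  have hsg := List.pairwise_iff_getElem.mp hs
  intro k
  induction k using Nat.strong_induction_on with
  | _ k ih =>
    intro a b hk h0 hab hb hlow hhigh
    rw [bisGt]
    dsimp only
    split
    case isTrue h =>
      have hd := (PySem.Int.floordiv_eq_iff_of_pos (a := a + b) (b := 2)
        (q := PySem.Int.floordiv (a + b) 2) (by norm_num)).mp rfl
      set m := PySem.Int.floordiv (a + b) 2 with hmdef
      have hm0 : 0 ≤ m := by omega
      have hmb : m < b := by omega
      have hmlen : m < (s.length : Int) := by omega
      rw [PySem.List.pyGetD_eq_getElem _ 0 hm0 hmlen]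
      split
      case isTrue hle =>
        have H := ih (b - (m + 1)).toNat (by omega) (m + 1) b rfl (by omega) (by omega) hb
          (fun i hi him => by
            by_cases hcase : (i : Int) < a
            · exact hlow i hi hcase
            · have : i ≤ m.toNat := by omega
              rcases Nat.lt_or_ge i m.toNat with hlt | hge
              · exact le_trans (hsg i m.toNat hi (by omega) hlt) hle
              · have : i = m.toNat := by omega
                subst this; exact hle)
          hhigh
        exact ⟨by omega, H.2.1, H.2.2.1, H.2.2.2⟩
      case isFalse hgt =>
        rw [not_le] at hgt
        have H := ih (m - a).toNat (by omega) a m rfl h0 (by omega) (by omega) hlow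
          (fun i hi him => by
            rcases Nat.lt_or_ge m.toNat i with hlt | hge
            · exact lt_of_lt_of_le hgt (hsg m.toNat i (by omega) hi hlt)
            · have : i = m.toNat := by omega
              subst this; exact hgt)
        exact ⟨H.1, by omega, H.2.2.1, H.2.2.2⟩
    case isFalse h =>
      have hab' : a = b := by omega
      exact ⟨le_refl _, by omega, fun i hi hia => hlow i hi hia, fun i hi hia => hhigh i hi (by omega)⟩


theorem cut_split (s : List Int) (mid j : Int) (h0 : 0 ≤ j) (h1 : j ≤ (s.length : Int))
    (hlow : ∀ (i : Nat) (hi : i < s.length), (i : Int) < j → s[i] ≤ mid)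
    (hhigh : ∀ (i : Nat) (hi : i < s.length), j ≤ (i : Int) → mid < s[i]) :
    cutOf s mid = (s.drop j.toNat).sum - ((s.length : Int) - j) * mid := by
  unfold cutOf
  conv_lhs => rw [← List.take_append_drop j.toNat s]
  rw [List.map_append, List.sum_append]
  have htake : ((s.take j.toNat).map (fun v => if v ≤ mid then 0 else v - mid)).sum = 0 := by
    apply List.sum_eq_zero
    intro x hx
    rw [List.mem_map] at hx
    obtain ⟨v, hv, hfx⟩ := hx
    rw [List.mem_take_iff_getElem] at hv
    obtain ⟨i, hm, hvi⟩ := hv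
    have := hlow i (by omega) (by omega)
    rw [hvi] at this
    simp [this] at hfx
    omega
  have hdrop : (s.drop j.toNat).map (fun v => if v ≤ mid then 0 else v - mid)
      = (s.drop j.toNat).map (fun v => v - mid) := by
    apply List.map_congr_left
    intro v hv
    rw [List.mem_drop_iff_getElem] at hv
    obtain ⟨i, hm, hvi⟩ := hv
    have := hhigh (j.toNat + i) (by omega) (by omega)
    rw [hvi] at this
    simp [not_le_of_gt this]
  rw [htake, hdrop, sum_map_sub, List.length_drop]
  have hcast : (((s.length - j.toNat : Nat)) : Int) = (s.length : Int) - j := by omega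
  rw [hcast]
  ring


theorem resultB_eq (lengths : List Int) (mid : Int) :
    PySem.List.pyGetD
      (((PySem.List.sorted lengths id false).reverse.foldl
          (fun acc v => acc ++ [v + PySem.List.pyGetD acc (-1) 0]) [0]).reverse)
      (bisGt (PySem.List.sorted lengths id false) mid 0 (((PySem.List.sorted lengths id false).length : Int))) 0
      - (((PySem.List.sorted lengths id false).length : Int)
          - bisGt (PySem.List.sorted lengths id false) mid 0 (((PySem.List.sorted lengths id false).length : Int))) * mid
      = cutOf lengths mid := by
  have hs : (PySem.List.sorted lengths id false).Pairwise (· ≤ ·) := by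
    simpa using PySem.List.sorted_pairwise lengths id
  set s := PySem.List.sorted lengths id false with hsdef
  have H := bisGt_spec s hs mid ((s.length : Int) - 0).toNat 0 (s.length : Int) rfl
    (by omega) (by omega) (by omega)
    (fun i hi h => absurd h (by omega))
    (fun i hi h => absurd h (by omega))
  obtain ⟨hj0, hjn, hlow, hhigh⟩ := H
  rw [suffix_get s _ hj0 hjn]
  rw [← cut_split s mid _ hj0 hjn hlow hhigh]
  exact cutOf_perm (PySem.List.sorted_perm lengths id false) mid

theorem loop_eq (lengths : List Int) (target : Int) :
    ∀ (k : Nat) (lo hi : Int), (hi - lo + 1).toNat = k →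
    loopB (PySem.List.sorted lengths id false)
      (((PySem.List.sorted lengths id false).reverse.foldl
          (fun acc v => acc ++ [v + PySem.List.pyGetD acc (-1) 0]) [0]).reverse)
      (((PySem.List.sorted lengths id false).length : Int)) lo hi target
      = getH lengths lo hi target := by
  intro k
  induction k using Nat.strong_induction_on with
  | _ k ih =>
    intro lo hi hk
    rw [loopB, getH]
    have hd := (PySem.Int.floordiv_eq_iff_of_pos (a := lo + hi) (b := 2)
      (q := PySem.Int.floordiv (lo + hi) 2) (by norm_num)).mp rfl
    set mid := PySem.Int.floordiv (lo + hi) 2 with hmdef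
    rw [resultB_eq lengths mid, scanA_eq lengths mid]
    split_ifs with h1 h2
    · exact ih ((mid - 1) - lo + 1).toNat (by omega) lo (mid - 1) rfl
    · exact ih (hi - (mid + 1) + 1).toNat (by omega) (mid + 1) hi rfl
    · rfl

-- ===== VERDICT (by name: the statement is the Claim_ definition above) =====
theorem getH_spec : Claim_equal_getH := by
  intro lengths h_start h_end target _
  unfold Spec_getH getH_alt
  exact (loop_eq lengths target (h_end - h_start + 1).toNat h_start h_end rfl).symm
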